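-- pv_equiv track=rewrite | github.com/Adam-Kolowrocki/New_begining | 07_File_operations/files_06_card_recognizer.py | card_rec
-- ===== SOURCE A (Python) =====
-- def card_rec(card_numbers):
--     """This function recognize credit cards by they number."""
--     visa = []
--     master = []
--     american = []
--     unknown = []
--     for number in card_numbers:
--         if (number[0: 2] == '34' or '37') and (len(number) == 15):
--             american.append(number)
--         elif number[0] == '4' and (len(number) == 13 or 16):
--             visa.append(number)
--         elif (len(number) == 16) and ((number[0: 2] == '51' or '55') or (number[0: 4] == '2221' or '2720')):
--             master.append(number)
--         else:
--             unknown.append(number)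
--     return visa, master, american, unknown
-- ===== SOURCE B (Python) =====
-- def card_rec(card_numbers):
--     """This function recognize credit cards by they number."""
--     american = [n for n in card_numbers if len(n) == 15]
--     visa = [n for n in card_numbers if len(n) != 15 and n[0] == '4']
--     master = [n for n in card_numbers if len(n) == 16 and n[0] != '4']
--     unknown = [n for n in card_numbers
--                if len(n) != 15 and len(n) != 16 and n[0] != '4']
--     return visa, master, american, unknown
-- ===== Notes on version B (the rewrite author's own statement) =====
-- stated objective: simpler
-- what changed: Replaces the single interleaved if/elif accumulation loop with four independent filtering passes whose predicates (len==15; else first char '4'; else len==16; else unknown) spell out the effective classification, since A's string-literal 'or' operands are always truthy and contribute nothing.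
-- outside the precondition, e.g. on card_rec(['', '4']): A raises IndexError, B raises IndexError
import Mathlib
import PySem

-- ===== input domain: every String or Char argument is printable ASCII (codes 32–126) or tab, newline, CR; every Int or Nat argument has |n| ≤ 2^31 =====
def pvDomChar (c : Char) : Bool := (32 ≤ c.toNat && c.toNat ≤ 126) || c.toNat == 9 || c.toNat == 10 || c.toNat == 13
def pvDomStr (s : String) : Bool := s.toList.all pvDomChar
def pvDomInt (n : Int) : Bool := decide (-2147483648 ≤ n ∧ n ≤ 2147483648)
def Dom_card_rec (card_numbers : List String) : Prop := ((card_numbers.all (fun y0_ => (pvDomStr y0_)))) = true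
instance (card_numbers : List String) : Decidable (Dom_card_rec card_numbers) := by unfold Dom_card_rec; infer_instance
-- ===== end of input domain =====

-- B replaces A's single interleaved if/elif loop with four independent filter passes
-- over the input whose predicates spell out the effective classification (objective: simpler).


-- ===== PORT A =====
-- One pass; Python's `(… == '34' or '37')`, `(len(number) == 13 or 16)`, and the whole
-- second conjunct of the master test are always truthy ('37', 16, '55' are truthy values),
-- ported literally as `|| true`.
def card_recStep (st : List String × List String × List String × List String) (number : String) :
    List String × List String × List String × List String :=
  let (visa, master, american, unknown) := st
  if ((PySem.Str.slice number (some 0) (some 2) == "34") || true) && (PySem.Str.len number == 15) then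
    (visa, master, american ++ [number], unknown)
  else
    match PySem.Str.pyGet? number 0 with
    | none => (visa, master, american, unknown)  -- number[0]: IndexError in Python; excluded by Pre_
    | some c =>
      if (c == '4') && ((PySem.Str.len number == 13) || true) then
        (visa ++ [number], master, american, unknown)
      else if (PySem.Str.len number == 16) &&
          (((PySem.Str.slice number (some 0) (some 2) == "51") || true) ||
           ((PySem.Str.slice number (some 0) (some 4) == "2221") || true)) then
        (visa, master ++ [number], american, unknown)
      else
        (visa, master, american, unknown ++ [number])

def card_rec (card_numbers : List String) : List String × List String × List String × List String :=
  card_numbers.foldl card_recStep ([], [], [], [])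

-- ===== PORT B =====
def card_rec_alt (card_numbers : List String) : List String × List String × List String × List String :=
  let american := card_numbers.filter (fun n => PySem.Str.len n == 15)
  let visa := card_numbers.filter (fun n => PySem.Str.len n != 15 && PySem.Str.pyGet? n 0 == some '4')
  let master := card_numbers.filter (fun n => PySem.Str.len n == 16 && PySem.Str.pyGet? n 0 != some '4')
  let unknown := card_numbers.filter
    (fun n => PySem.Str.len n != 15 && PySem.Str.len n != 16 && PySem.Str.pyGet? n 0 != some '4')
  (visa, master, american, unknown)

-- ===== PRECONDITION & SPEC =====
-- Pre_ excludes lists containing the empty string: there Python A (and B) raise IndexError on number[0].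
def Pre_card_rec (card_numbers : List String) : Prop := "" ∉ card_numbers
instance (card_numbers : List String) : Decidable (Pre_card_rec card_numbers) := by unfold Pre_card_rec; infer_instance
def pvWitness_card_rec : List String := ["378282246310005", "4111111111111111", "5105105105105100", "12"]

def Spec_card_rec (card_numbers : List String) (out : List String × List String × List String × List String) : Prop := out = card_rec_alt card_numbers
instance (card_numbers : List String) (out : List String × List String × List String × List String) : Decidable (Spec_card_rec card_numbers out) := by unfold Spec_card_rec; infer_instance

-- ===== CLAIM (what is proved, stated in full; the proofs are below) =====
def Claim_equal_card_rec : Prop := ∀ (card_numbers : List String), Dom_card_rec card_numbers → Pre_card_rec card_numbers → Spec_card_rec card_numbers (card_rec card_numbers)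

-- ===== LEMMAS AND PROOFS =====

theorem card_rec_fold (xs : List String) (v m a u : List String) (h : "" ∉ xs) :
    xs.foldl card_recStep (v, m, a, u) =
      (v ++ xs.filter (fun n => PySem.Str.len n != 15 && PySem.Str.pyGet? n 0 == some '4'),
       m ++ xs.filter (fun n => PySem.Str.len n == 16 && PySem.Str.pyGet? n 0 != some '4'),
       a ++ xs.filter (fun n => PySem.Str.len n == 15),
       u ++ xs.filter (fun n => PySem.Str.len n != 15 && PySem.Str.len n != 16 && PySem.Str.pyGet? n 0 != some '4')) := by
  induction xs generalizing v m a u with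
  | nil => simp
  | cons x xs ih =>
    have hx : x ≠ "" := fun hc => h (hc ▸ List.mem_cons_self)
    have hx' : "" ∉ xs := fun hc => h (List.mem_cons_of_mem _ hc)
    have hget : ∃ c, PySem.Str.pyGet? x 0 = some c := by
      have hne : x.toList ≠ [] := by
        intro hc
        exact hx (by simpa [String.toList_eq_nil_iff] using hc)
      cases hl : x.toList with
      | nil => exact absurd hl hne
      | cons c cs => exact ⟨c, by simp [hl]⟩
    obtain ⟨c, hc⟩ := hget
    have hc' : PySem.List.pyGet? x.toList 0 = some c := by simpa using hc
    have hg : x.toList[0]? = some c := by rw [← PySem.List.pyGet?_zero]; exact hc'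
    by_cases h15 : (x.length : Int) = 15
    · simp only [List.foldl_cons, card_recStep]
      rw [ih _ _ _ _ hx']
      simp [h15, List.filter_cons]
    · by_cases h4 : c = '4'
      · subst h4
        simp only [List.foldl_cons, card_recStep]
        rw [ih _ _ _ _ hx']
        simp [h15, hc', hg, List.filter_cons]
      · have h4' : ¬ PySem.List.pyGet? x.toList 0 = some '4' := by
          rw [hc']; exact fun hco => h4 (Option.some.inj hco)
        have hg4 : ¬ x.toList[0]? = some '4' := by
          rw [hg]; exact fun hco => h4 (Option.some.inj hco)
        by_cases h16 : (x.length : Int) = 16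
        · simp only [List.foldl_cons, card_recStep]
          rw [ih _ _ _ _ hx']
          simp [h15, h16, hc', h4', hg, hg4, h4, List.filter_cons]
        · simp only [List.foldl_cons, card_recStep]
          rw [ih _ _ _ _ hx']
          simp [h15, h16, hc', h4', hg, hg4, h4, List.filter_cons]

-- ===== VERDICT (by name: the statement is the Claim_ definition above) =====
theorem card_rec_spec : Claim_equal_card_rec := by
  intro xs _ hpre
  unfold Spec_card_rec card_rec
  rw [card_rec_fold xs [] [] [] [] hpre]
  simp [card_rec_alt]
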